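-- pv_equiv track=rewrite | github.com/gabboily/comp115_project2 | project2_gabrielle.py | group_counts
-- ===== SOURCE A (Python) =====
-- def group_counts(genres, times):                # convert lists into a dictionary where all values are linked
--     count_dict = {}
--     for g, t in zip(genres, times):
--         if g not in count_dict:
--             count_dict[g] = {}
--         if t in count_dict[g]:
--             count_dict[g][t] += 1
--         else:
--             count_dict[g][t] = 1
--     return count_dict
-- ===== SOURCE B (Python) =====
-- def group_counts(genres, times):
--     # Pass 1: flat tally keyed by (genre, time) pairs.
--     flat = {}
--     for pair in zip(genres, times):
--         flat[pair] = flat.get(pair, 0) + 1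
--     # Pass 2: unfold the flat table into the nested dict.
--     count_dict = {}
--     for (g, t), n in flat.items():
--         if g not in count_dict:
--             count_dict[g] = {}
--         count_dict[g][t] = n
--     return count_dict
-- ===== Notes on version B (the rewrite author's own statement) =====
-- stated objective: alternative
-- what changed: B replaces A's single interleaved loop of nested-dict updates by two passes: first a flat tally dict keyed by (genre, time) pairs, then a second pass that unfolds that flat table into the nested dict.
import Mathlib
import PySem

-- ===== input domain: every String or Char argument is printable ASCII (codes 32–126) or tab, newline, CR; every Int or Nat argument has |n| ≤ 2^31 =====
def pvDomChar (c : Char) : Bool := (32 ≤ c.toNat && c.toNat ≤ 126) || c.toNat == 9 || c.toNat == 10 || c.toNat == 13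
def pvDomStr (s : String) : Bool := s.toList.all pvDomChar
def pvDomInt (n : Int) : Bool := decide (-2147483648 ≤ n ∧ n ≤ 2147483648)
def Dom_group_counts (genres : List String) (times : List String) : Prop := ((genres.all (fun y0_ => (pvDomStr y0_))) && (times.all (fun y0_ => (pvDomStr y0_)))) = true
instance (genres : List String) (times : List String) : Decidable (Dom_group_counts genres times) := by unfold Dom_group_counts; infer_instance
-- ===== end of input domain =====

-- B replaces A's single interleaved loop of nested-dict updates by two passes (a flat tally
-- dict keyed by (genre, time) pairs, then a pass unfolding that table into the nested dict);
-- objective: alternative decomposition, same cost.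

-- ===== PORT A =====
def group_counts (genres : List String) (times : List String) : List (String × List (String × Int)) :=
  let d := (genres.zip times).foldl (fun d p =>
    let d := if d.contains p.1 then d else d.insert p.1 PySem.Dict.empty
    let inner := d.getD p.1 PySem.Dict.empty
    let inner := if inner.contains p.2 then inner.insert p.2 (inner.getD p.2 0 + 1)
                 else inner.insert p.2 1
    d.insert p.1 inner) PySem.Dict.empty
  d.items.map (fun q => (q.1, q.2.items))

-- ===== PORT B =====
def group_counts_alt (genres : List String) (times : List String) : List (String × List (String × Int)) :=
  let flat := (genres.zip times).foldl (fun d p => d.insert p (d.getD p 0 + 1)) PySem.Dict.empty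
  let out := flat.items.foldl (fun d q =>
    let d := if d.contains q.1.1 then d else d.insert q.1.1 PySem.Dict.empty
    d.insert q.1.1 ((d.getD q.1.1 PySem.Dict.empty).insert q.1.2 q.2)) PySem.Dict.empty
  out.items.map (fun q => (q.1, q.2.items))

-- ===== PRECONDITION & SPEC =====
def Spec_group_counts (genres : List String) (times : List String) (out : List (String × List (String × Int))) : Prop := out = group_counts_alt genres times
instance (genres : List String) (times : List String) (out : List (String × List (String × Int))) : Decidable (Spec_group_counts genres times out) := by unfold Spec_group_counts; infer_instance

-- ===== CLAIM (what is proved, stated in full; the proofs are below) =====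
def Claim_equal_group_counts : Prop := ∀ (genres : List String) (times : List String), Dom_group_counts genres times → Spec_group_counts genres times (group_counts genres times)

-- ===== LEMMAS AND PROOFS =====

def stepA (d : PySem.Dict String (PySem.Dict String Int)) (p : String × String) :
    PySem.Dict String (PySem.Dict String Int) :=
  let d := if d.contains p.1 then d else d.insert p.1 PySem.Dict.empty
  let inner := d.getD p.1 PySem.Dict.empty
  let inner := if inner.contains p.2 then inner.insert p.2 (inner.getD p.2 0 + 1)
               else inner.insert p.2 1
  d.insert p.1 inner

def innerD (ps : List (String × String)) (g : String) : PySem.Dict String Int :=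
  PySem.Dict.mk ((PySem.Set.ofList ((ps.filter (fun p => p.1 == g)).map Prod.snd)).map
    (fun t => (t, (ps.count (g, t) : Int))))

def FA (ps : List (String × String)) : PySem.Dict String (PySem.Dict String Int) :=
  PySem.Dict.mk ((PySem.Set.ofList (ps.map Prod.fst)).map (fun g => (g, innerD ps g)))

theorem keys_FA (ps : List (String × String)) :
    (FA ps).keys = PySem.Set.ofList (ps.map Prod.fst) := by
  simp only [FA, PySem.Dict.keys, List.map_map]; exact List.map_id _

theorem keys_innerD (ps : List (String × String)) (g : String) :
    (innerD ps g).keys = PySem.Set.ofList ((ps.filter (fun p => p.1 == g)).map Prod.snd) := by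
  simp only [innerD, PySem.Dict.keys, List.map_map]; exact List.map_id _

theorem count_singleton_ne (x y : String × String) (h : ¬ x = y) :
    List.count y [x] = 0 := by
  simp [h]

theorem innerD_congr (ps : List (String × String)) (x : String × String) (g' : String)
    (hne : x.1 ≠ g') : innerD (ps ++ [x]) g' = innerD ps g' := by
  apply PySem.Dict.ext
  have hsing : List.filter (fun p => p.1 == g') [x] = [] := by simp [hne]
  show List.map _ (PySem.Set.ofList (((ps ++ [x]).filter _).map Prod.snd)) = _
  rw [List.filter_append, hsing, List.append_nil]
  apply List.map_congr_left
  intro t' _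
  simp only [List.count_append,
    count_singleton_ne x (g', t') (fun he => hne (by rw [he])), Nat.add_zero]

theorem mem_snd_filter_iff (ps : List (String × String)) (x : String × String) :
    x.2 ∈ (ps.filter (fun p => p.1 == x.1)).map Prod.snd ↔ x ∈ ps := by
  simp only [List.mem_map, List.mem_filter]
  constructor
  · rintro ⟨p, ⟨hp, hpg⟩, hps⟩
    have : p = x := Prod.ext (by simpa using hpg) hps
    exact this ▸ hp
  · intro hx; exact ⟨x, ⟨hx, by simp⟩, rfl⟩

theorem foldA_eq (ps : List (String × String)) :
    ps.foldl stepA PySem.Dict.empty = FA ps := by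
  induction ps using List.reverseRecOn with
  | nil => rfl
  | append_singleton ps x ih =>
    rw [List.foldl_append, List.foldl_cons, List.foldl_nil, ih]
    have hfilt_self : List.filter (fun p => p.1 == x.1) [x] = [x] := by simp
    by_cases hg : x.1 ∈ ps.map Prod.fst
    · have hcont : (FA ps).contains x.1 = true := by
        rw [PySem.Dict.contains_eq_decide_mem_keys, keys_FA, decide_eq_true_eq,
          PySem.Set.mem_ofList]
        exact hg
      have hndk : (FA ps).keys.Nodup := by rw [keys_FA]; exact PySem.Set.nodup_ofList _
      have hmemi : (x.1, innerD ps x.1) ∈ (FA ps).items :=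
        List.mem_map_of_mem ((PySem.Set.mem_ofList _ _).mpr hg)
      have hget := PySem.Dict.getD_of_mem_items _ hmemi hndk PySem.Dict.empty
      have hcontT : (innerD ps x.1).contains x.2 = decide (x ∈ ps) := by
        rw [PySem.Dict.contains_eq_decide_mem_keys, keys_innerD]
        by_cases htm : x ∈ ps
        · simp [PySem.Set.mem_ofList, (mem_snd_filter_iff ps x).mpr htm, htm]
        · simp [PySem.Set.mem_ofList, htm]
      have hstep : stepA (FA ps) x = (FA ps).insert x.1 (innerD (ps ++ [x]) x.1) := by
        by_cases ht : x ∈ ps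
        · have hcT : (innerD ps x.1).contains x.2 = true := by rw [hcontT]; simpa using ht
          have hgetT : (innerD ps x.1).getD x.2 0 = (ps.count x : Int) := by
            apply PySem.Dict.getD_of_mem_items
            · exact List.mem_map_of_mem ((PySem.Set.mem_ofList _ _).mpr
                ((mem_snd_filter_iff ps x).mpr ht))
            · rw [keys_innerD]; exact PySem.Set.nodup_ofList _
          have hinner : (innerD ps x.1).insert x.2 ((ps.count x : Int) + 1)
              = innerD (ps ++ [x]) x.1 := by
            apply PySem.Dict.ext
            rw [PySem.Dict.items_insert_of_contains _ _ hcT]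
            show List.map _ (List.map _ _) = _
            rw [List.map_map]
            show _ = List.map _ (PySem.Set.ofList (((ps ++ [x]).filter _).map Prod.snd))
            rw [List.filter_append, hfilt_self, List.map_append, List.map_singleton,
              PySem.Set.ofList_append_singleton,
              PySem.Set.add_of_mem ((PySem.Set.mem_ofList _ _).mpr
                ((mem_snd_filter_iff ps x).mpr ht))]
            apply List.map_congr_left
            intro t' ht'
            simp only [Function.comp]
            by_cases htt : t' = x.2
            · subst htt
              rw [if_pos (by simp)]
              have hcx : List.count (x.1, x.2) (ps ++ [x]) = List.count x ps + 1 := by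
                show List.count x (ps ++ [x]) = _
                simp [List.count_append]
              rw [hcx]
              simp
            · rw [if_neg (by simpa using htt)]
              have hone : List.count (x.1, t') [x] = 0 :=
                count_singleton_ne x (x.1, t') (fun he => htt (congrArg Prod.snd he).symm)
              simp only [List.count_append, hone, Nat.add_zero]
          show (if (FA ps).contains x.1 then FA ps else _).insert x.1 _ = _
          rw [hcont, if_pos rfl, hget, hcT, if_pos (by simp), hgetT, hinner]
        · have hcT : (innerD ps x.1).contains x.2 = false := by rw [hcontT]; simpa using ht
          have hinner : (innerD ps x.1).insert x.2 1 = innerD (ps ++ [x]) x.1 := by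
            apply PySem.Dict.ext
            rw [PySem.Dict.items_insert_of_not_contains _ _ hcT]
            show _ = List.map _ (PySem.Set.ofList (((ps ++ [x]).filter _).map Prod.snd))
            rw [List.filter_append, hfilt_self, List.map_append, List.map_singleton,
              PySem.Set.ofList_append_singleton,
              PySem.Set.add_of_not_mem (fun hc =>
                ht ((mem_snd_filter_iff ps x).mp ((PySem.Set.mem_ofList _ _).mp hc))),
              List.map_append, List.map_singleton]
            congr 1
            · show List.map _ (PySem.Set.ofList _) = _
              apply List.map_congr_left
              intro t' ht'
              have hmem' : (x.1, t') ∈ ps :=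
                (mem_snd_filter_iff ps (x.1, t')).mp ((PySem.Set.mem_ofList _ _).mp ht')
              have hone : List.count (x.1, t') [x] = 0 :=
                count_singleton_ne x (x.1, t') (fun he => ht (he ▸ hmem'))
              simp only [List.count_append, hone, Nat.add_zero]
            · have hzero : List.count x ps = 0 := List.count_eq_zero_of_not_mem ht
              have hcx : List.count (x.1, x.2) (ps ++ [x]) = 1 := by
                show List.count x (ps ++ [x]) = 1
                simp [List.count_append, hzero]
              rw [hcx]
              norm_num
          show (if (FA ps).contains x.1 then FA ps else _).insert x.1 _ = _
          rw [hcont, if_pos rfl, hget, hcT, if_neg (by simp), hinner]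
      rw [hstep]
      apply PySem.Dict.ext
      rw [PySem.Dict.items_insert_of_contains _ _ hcont]
      show List.map _ (List.map _ _) = _
      rw [List.map_map]
      show _ = List.map _ (PySem.Set.ofList ((ps ++ [x]).map Prod.fst))
      rw [List.map_append, List.map_singleton, PySem.Set.ofList_append_singleton,
        PySem.Set.add_of_mem ((PySem.Set.mem_ofList _ _).mpr hg)]
      apply List.map_congr_left
      intro g' hg'
      simp only [Function.comp]
      by_cases hgg : g' = x.1
      · rw [hgg, if_pos (by simp)]
      · rw [if_neg (by simpa using hgg), innerD_congr ps x g' (fun he => hgg (by rw [he]))]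
    · have hcont : (FA ps).contains x.1 = false := by
        rw [PySem.Dict.contains_eq_decide_mem_keys, keys_FA, decide_eq_false_iff_not,
          PySem.Set.mem_ofList]
        exact hg
      have hxps : x ∉ ps := fun hm => hg (List.mem_map_of_mem hm)
      have hstep : stepA (FA ps) x = (FA ps).insert x.1 (PySem.Dict.mk [(x.2, (1 : Int))]) := by
        show (if (FA ps).contains x.1 then FA ps else _).insert x.1 _ = _
        rw [hcont, if_neg (by simp), PySem.Dict.getD_insert_self, PySem.Dict.contains_empty,
          if_neg (by simp), PySem.Dict.insert_insert_self]
        rfl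
      rw [hstep]
      apply PySem.Dict.ext
      rw [PySem.Dict.items_insert_of_not_contains _ _ hcont]
      show _ = List.map _ (PySem.Set.ofList ((ps ++ [x]).map Prod.fst))
      rw [List.map_append, List.map_singleton, PySem.Set.ofList_append_singleton,
        PySem.Set.add_of_not_mem (fun hc => hg ((PySem.Set.mem_ofList _ _).mp hc)),
        List.map_append, List.map_singleton]
      congr 1
      · show List.map _ (PySem.Set.ofList (ps.map Prod.fst)) = _
        apply List.map_congr_left
        intro g' hg'
        have hgg : x.1 ≠ g' := fun he => hg (he ▸ (PySem.Set.mem_ofList _ _).mp hg')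
        rw [innerD_congr ps x g' hgg]
      · have hnil : List.filter (fun p => p.1 == x.1) ps = [] := by
          rw [List.filter_eq_nil_iff]
          intro p hp hc
          exact hg (List.mem_map.mpr (Exists.intro p (And.intro hp (by simpa using hc))))
        have hzero : List.count x ps = 0 := List.count_eq_zero_of_not_mem hxps
        have hcx : List.count (x.1, x.2) (ps ++ [x]) = 1 := by
          show List.count x (ps ++ [x]) = 1
          simp [List.count_append, hzero]
        show _ = [(x.1, innerD (ps ++ [x]) x.1)]
        have : innerD (ps ++ [x]) x.1 = PySem.Dict.mk [(x.2, (1 : Int))] := by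
          apply PySem.Dict.ext
          show List.map _ (PySem.Set.ofList (((ps ++ [x]).filter _).map Prod.snd)) = _
          rw [List.filter_append, hfilt_self, hnil, List.nil_append, List.map_singleton]
          show List.map _ (PySem.Set.ofList [x.2]) = _
          rw [show PySem.Set.ofList [x.2] = [x.2] from rfl, List.map_singleton, hcx]
          rfl
        rw [this]


def stepB (d : PySem.Dict String (PySem.Dict String Int)) (q : (String × String) × Int) :
    PySem.Dict String (PySem.Dict String Int) :=
  let d := if d.contains q.1.1 then d else d.insert q.1.1 PySem.Dict.empty
  d.insert q.1.1 ((d.getD q.1.1 PySem.Dict.empty).insert q.1.2 q.2)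

def FB (L : List ((String × String) × Int)) : PySem.Dict String (PySem.Dict String Int) :=
  PySem.Dict.mk ((PySem.Set.ofList (L.map (·.1.1))).map (fun g =>
    (g, PySem.Dict.mk ((L.filter (fun p => p.1.1 == g)).map (fun p => (p.1.2, p.2))))))

theorem keys_FB (L : List ((String × String) × Int)) :
    (FB L).keys = PySem.Set.ofList (L.map (·.1.1)) := by
  simp only [FB, PySem.Dict.keys, List.map_map]; exact List.map_id _

theorem foldB_eq (L : List ((String × String) × Int)) (h : (L.map (·.1)).Nodup) :
    L.foldl stepB PySem.Dict.empty = FB L := by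
  induction L using List.reverseRecOn with
  | nil => rfl
  | append_singleton L x ih =>
    rw [List.map_append, List.nodup_append] at h
    have hndL : (L.map (·.1)).Nodup := h.1
    have hx1 : x.1 ∉ L.map (·.1) := fun hm => h.2.2 x.1 hm x.1 (List.mem_singleton_self _) rfl
    rw [List.foldl_append, List.foldl_cons, List.foldl_nil, ih hndL]
    have hfilt_self : List.filter (fun p => p.1.1 == x.1.1) [x] = [x] := by simp
    by_cases hg : x.1.1 ∈ L.map (·.1.1)
    · have hcont : (FB L).contains x.1.1 = true := by
        rw [PySem.Dict.contains_eq_decide_mem_keys, keys_FB, decide_eq_true_eq,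
          PySem.Set.mem_ofList]
        exact hg
      have hndk : (FB L).keys.Nodup := by rw [keys_FB]; exact PySem.Set.nodup_ofList _
      have hmemi : (x.1.1, PySem.Dict.mk ((L.filter (fun p => p.1.1 == x.1.1)).map
          (fun p => (p.1.2, p.2)))) ∈ (FB L).items :=
        List.mem_map_of_mem ((PySem.Set.mem_ofList _ _).mpr hg)
      have hget := PySem.Dict.getD_of_mem_items _ hmemi hndk PySem.Dict.empty
      have hcontT : (PySem.Dict.mk ((L.filter (fun p => p.1.1 == x.1.1)).map
          (fun p => (p.1.2, p.2)))).contains x.1.2 = false := by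
        rw [PySem.Dict.contains_eq_decide_mem_keys, decide_eq_false_iff_not]
        simp only [PySem.Dict.keys, List.map_map, List.mem_map, List.mem_filter, Function.comp]
        rintro ⟨p, ⟨hp, hpg⟩, hpt⟩
        exact hx1 (by
          have : p.1 = x.1 := Prod.ext (by simpa using hpg) hpt
          exact this ▸ List.mem_map_of_mem hp)
      have hstep : stepB (FB L) x = (FB L).insert x.1.1
          (PySem.Dict.mk ((L.filter (fun p => p.1.1 == x.1.1)).map (fun p => (p.1.2, p.2))
            ++ [(x.1.2, x.2)])) := by
        show (if (FB L).contains x.1.1 then FB L else _).insert x.1.1 _ = _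
        rw [hcont, if_pos rfl, hget]
        congr 1
        apply PySem.Dict.ext
        rw [PySem.Dict.items_insert_of_not_contains _ _ hcontT]
      rw [hstep]
      apply PySem.Dict.ext
      rw [PySem.Dict.items_insert_of_contains _ _ hcont]
      show List.map _ ((PySem.Set.ofList (L.map (·.1.1))).map _) = (FB (L ++ [x])).items
      rw [List.map_map]
      show _ = ((PySem.Set.ofList ((L ++ [x]).map (·.1.1))).map _)
      rw [List.map_append, List.map_singleton, PySem.Set.ofList_append_singleton,
        PySem.Set.add_of_mem ((PySem.Set.mem_ofList _ _).mpr hg)]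
      apply List.map_congr_left
      intro g' hg'
      simp only [Function.comp]
      by_cases hgg : g' = x.1.1
      · rw [hgg, if_pos (by simp)]
        rw [List.filter_append, hfilt_self, List.map_append]
        rfl
      · rw [if_neg (by simpa using hgg)]
        have hne : ¬ (x.1.1 = g') := fun he => hgg he.symm
        have hsing : List.filter (fun p => p.1.1 == g') [x] = [] := by simp [hne]
        have hf : List.filter (fun p => p.1.1 == g') (L ++ [x]) =
            List.filter (fun p => p.1.1 == g') L := by
          rw [List.filter_append, hsing, List.append_nil]
        rw [hf]
    · have hcont : (FB L).contains x.1.1 = false := by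
        rw [PySem.Dict.contains_eq_decide_mem_keys, keys_FB, decide_eq_false_iff_not,
          PySem.Set.mem_ofList]
        exact hg
      have hstep : stepB (FB L) x = (FB L).insert x.1.1 (PySem.Dict.mk [(x.1.2, x.2)]) := by
        show (if (FB L).contains x.1.1 then FB L else _).insert x.1.1 _ = _
        rw [hcont, if_neg (by simp), PySem.Dict.getD_insert_self, PySem.Dict.insert_insert_self]
        rfl
      rw [hstep]
      apply PySem.Dict.ext
      rw [PySem.Dict.items_insert_of_not_contains _ _ hcont]
      show _ = ((PySem.Set.ofList ((L ++ [x]).map (·.1.1))).map _)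
      rw [List.map_append, List.map_singleton, PySem.Set.ofList_append_singleton,
        PySem.Set.add_of_not_mem (fun hc => hg ((PySem.Set.mem_ofList _ _).mp hc)),
        List.map_append]
      congr 1
      · show ((PySem.Set.ofList (L.map (·.1.1))).map _) = _
        apply List.map_congr_left
        intro g' hg'
        have hgg : ¬ (x.1.1 = g') := fun he => hg (he ▸ (PySem.Set.mem_ofList _ _).mp hg')
        have hsing : List.filter (fun p => p.1.1 == g') [x] = [] := by simp [hgg]
        have hf : List.filter (fun p => p.1.1 == g') (L ++ [x]) =
            List.filter (fun p => p.1.1 == g') L := by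
          rw [List.filter_append, hsing, List.append_nil]
        rw [hf]
      · have hnil : List.filter (fun p => p.1.1 == x.1.1) L = [] := by
          rw [List.filter_eq_nil_iff]
          intro p hp hc
          exact hg (List.mem_map.mpr ⟨p, hp, by simpa using hc⟩)
        rw [List.map_singleton, List.filter_append, hnil, hfilt_self, List.nil_append]
        rfl


theorem ofList_map_ofList {α β : Type} [BEq α] [LawfulBEq α] [BEq β] [LawfulBEq β]
    (l : List α) (f : α → β) :
    PySem.Set.ofList ((PySem.Set.ofList l).map f) = PySem.Set.ofList (l.map f) := by
  induction l using List.reverseRecOn with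
  | nil => rfl
  | append_singleton l x ih =>
    rw [PySem.Set.ofList_append_singleton, List.map_append, List.map_singleton,
      PySem.Set.ofList_append_singleton]
    by_cases hx : x ∈ l
    · rw [PySem.Set.add_of_mem (by rw [PySem.Set.mem_ofList]; exact hx), ih,
        PySem.Set.add_of_mem (by rw [PySem.Set.mem_ofList]; exact List.mem_map_of_mem hx)]
    · rw [PySem.Set.add_of_not_mem (by rw [PySem.Set.mem_ofList]; exact hx),
        List.map_append, List.map_singleton, PySem.Set.ofList_append_singleton, ih]

theorem ofList_filter_snd {α β : Type} [BEq α] [LawfulBEq α] [BEq β] [LawfulBEq β]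
    (l : List (α × β)) (g : α) :
    PySem.Set.ofList ((l.filter (fun p => p.1 == g)).map Prod.snd)
      = ((PySem.Set.ofList l).filter (fun p => p.1 == g)).map Prod.snd := by
  induction l using List.reverseRecOn with
  | nil => rfl
  | append_singleton l x ih =>
    rw [List.filter_append, PySem.Set.ofList_append_singleton]
    by_cases hg : x.1 = g
    · have hfx : List.filter (fun p => p.1 == g) [x] = [x] := by simp [hg]
      have hmem : x.2 ∈ (l.filter (fun p => p.1 == g)).map Prod.snd ↔ x ∈ l := by
        simp only [List.mem_map, List.mem_filter]
        constructor
        · rintro ⟨p, ⟨hp, hpg⟩, hps⟩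
          have : p = x := Prod.ext ((by simpa using hpg : p.1 = g).trans hg.symm) hps
          exact this ▸ hp
        · intro hx; exact ⟨x, ⟨hx, by simp [hg]⟩, rfl⟩
      rw [hfx, List.map_append, List.map_singleton, PySem.Set.ofList_append_singleton]
      by_cases hx : x ∈ l
      · rw [PySem.Set.add_of_mem (by rw [PySem.Set.mem_ofList]; exact hmem.mpr hx),
          PySem.Set.add_of_mem (by rw [PySem.Set.mem_ofList]; exact hx), ih]
      · rw [PySem.Set.add_of_not_mem (by rw [PySem.Set.mem_ofList]; exact fun h => hx (hmem.mp h)),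
          PySem.Set.add_of_not_mem (by rw [PySem.Set.mem_ofList]; exact hx),
          List.filter_append, hfx, List.map_append, List.map_singleton, ih]
    · have hfx : List.filter (fun p => p.1 == g) [x] = [] := by simp [hg]
      rw [hfx, List.append_nil, ih]
      by_cases hx : x ∈ l
      · rw [PySem.Set.add_of_mem (by rw [PySem.Set.mem_ofList]; exact hx)]
      · rw [PySem.Set.add_of_not_mem (by rw [PySem.Set.mem_ofList]; exact hx),
          List.filter_append, hfx, List.append_nil]

-- ===== VERDICT (by name: the statement is the Claim_ definition above) =====
theorem group_counts_spec : Claim_equal_group_counts := by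
  intro genres times _
  unfold Spec_group_counts
  show (((genres.zip times).foldl stepA PySem.Dict.empty).items.map (fun q => (q.1, q.2.items)))
      = group_counts_alt genres times
  have halt : group_counts_alt genres times
      = ((((PySem.Set.ofList (genres.zip times)).map
            (fun k => (k, ((genres.zip times).count k : Int)))).foldl stepB
          PySem.Dict.empty).items.map (fun q => (q.1, q.2.items))) := by
    show (((genres.zip times).foldl (fun d p => d.insert p (d.getD p 0 + 1))
        PySem.Dict.empty).items.foldl stepB PySem.Dict.empty).items.map _ = _
    rw [PySem.Dict.foldl_insert_getD_add_one_eq_counter, PySem.Dict.items_counter]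
  rw [halt, foldA_eq]
  set ps := genres.zip times with hps
  set L := (PySem.Set.ofList ps).map (fun k => (k, (ps.count k : Int))) with hL
  have hnd : (L.map (·.1)).Nodup := by
    rw [hL, List.map_map]
    exact (List.map_id _ : List.map _ _ = _) ▸ PySem.Set.nodup_ofList ps
  rw [foldB_eq L hnd]
  show List.map _ (List.map _ _) = List.map _ (List.map _ _)
  rw [List.map_map, List.map_map]
  have houter : PySem.Set.ofList (L.map (·.1.1)) = PySem.Set.ofList (ps.map Prod.fst) := by
    rw [hL, List.map_map]
    exact ofList_map_ofList ps Prod.fst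
  rw [houter]
  apply List.map_congr_left
  intro g hg
  simp only [Function.comp]
  congr 1
  show (innerD ps g).items = ((L.filter (fun p => p.1.1 == g)).map (fun p => (p.1.2, p.2)))
  symm
  have hfl : L.filter (fun p => p.1.1 == g)
      = ((PySem.Set.ofList ps).filter (fun k => k.1 == g)).map
          (fun k => (k, (ps.count k : Int))) := by
    rw [hL, List.filter_map]
    rfl
  rw [hfl, List.map_map]
  show _ = List.map _ (PySem.Set.ofList ((ps.filter (fun p => p.1 == g)).map Prod.snd))
  rw [ofList_filter_snd, List.map_map]
  apply List.map_congr_left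
  intro k hk
  have hk1 : k.1 = g := by simpa using (List.mem_filter.mp hk).2
  have hke : (g, k.2) = k := Prod.ext hk1.symm rfl
  simp only [Function.comp]
  rw [hke]
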